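-- pv_equiv track=rewrite | github.com/NVIDIA/Megatron-LM | megatron/training/simulation/analyzer.py | classify_memory_phase
-- ===== SOURCE A (Python) =====
-- from typing import Any, Dict, List, Optional, Tuple
--
-- def classify_memory_phase(frames: List[Dict]) -> str:
--     """
--     Classify memory allocation phase based on call stack frames
--     Adapted from memory_viz.py classify_call_stack function
--     """
--     if not frames:
--         return "other"
--
--     found_backward = False
--
--     # Traverse call stack in reverse order (from outer to inner)
--     for frame in reversed(frames):
--         name = frame.get("name", "").lower()
--
--         if "forward_backward" in name:
--             continue
--
--         # First phase: look for first backward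
--         if not found_backward:
--             if "backward" in name:
--                 found_backward = True
--             elif "forward" in name:
--                 return "forward"
--         # Second phase: look for forward after backward (recompute)
--         else:
--             if "forward" in name:
--                 return "backward_recompute"
--
--     return "backward" if found_backward else "other"
-- ===== SOURCE B (Python) =====
-- def classify_memory_phase(frames):
--     """
--     Classify memory allocation phase based on call stack frames.
--     Two-stage: first build a table of (has_backward, has_forward) marks for the
--     relevant frames (outer to inner), then classify from the table alone.
--     """
--     marks = []
--     for frame in reversed(frames):
--         name = frame.get("name", "").lower()
--         if "forward_backward" in name:
--             continue
--         b = "backward" in name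
--         f = "forward" in name
--         if b or f:
--             marks.append((b, f))
--     if not marks:
--         return "other"
--     if not marks[0][0]:
--         return "forward"
--     return "backward_recompute" if any(f for _, f in marks[1:]) else "backward"
-- ===== Notes on version B (the rewrite author's own statement) =====
-- stated objective: alternative
-- what changed: Replaces the single stateful reverse scan with early returns by a two-stage decomposition: one pass builds a table of (has_backward, has_forward) marks for the relevant frames, then the phase is classified structurally from that table alone.
import Mathlib
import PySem

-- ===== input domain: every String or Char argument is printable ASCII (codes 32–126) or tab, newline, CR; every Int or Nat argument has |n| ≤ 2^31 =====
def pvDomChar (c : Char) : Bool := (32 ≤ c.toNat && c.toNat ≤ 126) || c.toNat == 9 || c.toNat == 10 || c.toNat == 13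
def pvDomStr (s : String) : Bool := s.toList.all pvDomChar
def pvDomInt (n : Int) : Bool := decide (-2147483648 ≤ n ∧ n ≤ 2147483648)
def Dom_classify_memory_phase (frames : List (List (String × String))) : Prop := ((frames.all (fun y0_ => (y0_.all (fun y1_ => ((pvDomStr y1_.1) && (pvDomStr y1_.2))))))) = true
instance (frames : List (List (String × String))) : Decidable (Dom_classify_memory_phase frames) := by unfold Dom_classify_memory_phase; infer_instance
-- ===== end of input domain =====

-- B replaces A's single stateful reverse scan (early returns + found_backward flag) by a
-- two-stage decomposition: build a table of (has_backward, has_forward) marks, then classify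
-- the table structurally. Same cost; objective: alternative decomposition.

-- shared helper: frame.get("name", "").lower()
def pvNameOf (frame : List (String × String)) : String :=
  PySem.Str.lower ((PySem.Dict.mk frame).getD "name" "")

-- ===== PORT A =====
def pvLoopA : List (List (String × String)) → Bool → String
  | [], fb => if fb then "backward" else "other"
  | f :: rest, fb =>
    let name := pvNameOf f
    if PySem.Str.isIn "forward_backward" name then pvLoopA rest fb
    else if !fb then
      if PySem.Str.isIn "backward" name then pvLoopA rest true
      else if PySem.Str.isIn "forward" name then "forward"
      else pvLoopA rest fb
    else
      if PySem.Str.isIn "forward" name then "backward_recompute"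
      else pvLoopA rest fb

def classify_memory_phase (frames : List (List (String × String))) : String :=
  if frames = [] then "other" else pvLoopA frames.reverse false

-- ===== PORT B =====
-- stage 1: the table of (has_backward, has_forward) marks over the relevant frames
def pvMarks : List (List (String × String)) → List (Bool × Bool)
  | [] => []
  | f :: rest =>
    let name := pvNameOf f
    if PySem.Str.isIn "forward_backward" name then pvMarks rest
    else
      let b := PySem.Str.isIn "backward" name
      let fw := PySem.Str.isIn "forward" name
      if b || fw then (b, fw) :: pvMarks rest else pvMarks rest

-- stage 2: classify from the table alone
def pvClassify : List (Bool × Bool) → String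
  | [] => "other"
  | (b, _) :: rest =>
    if !b then "forward"
    else if rest.any (fun p => p.2) then "backward_recompute" else "backward"

def classify_memory_phase_alt (frames : List (List (String × String))) : String :=
  pvClassify (pvMarks frames.reverse)

-- ===== PRECONDITION & SPEC =====
def Spec_classify_memory_phase (frames : List (List (String × String))) (out : String) : Prop := out = classify_memory_phase_alt frames
instance (frames : List (List (String × String))) (out : String) : Decidable (Spec_classify_memory_phase frames out) := by unfold Spec_classify_memory_phase; infer_instance

-- ===== CLAIM (what is proved, stated in full; the proofs are below) =====
def Claim_equal_classify_memory_phase : Prop := ∀ (frames : List (List (String × String))), Dom_classify_memory_phase frames → Spec_classify_memory_phase frames (classify_memory_phase frames)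

-- ===== LEMMAS AND PROOFS =====
theorem pvLoop_eq (l : List (List (String × String))) :
    pvLoopA l false = pvClassify (pvMarks l) ∧
    pvLoopA l true = (if (pvMarks l).any (fun p => p.2) then "backward_recompute" else "backward") := by
  induction l with
  | nil => simp [pvLoopA, pvMarks, pvClassify]
  | cons f rest ih =>
    obtain ⟨ih1, ih2⟩ := ih
    simp only [pvLoopA, pvMarks]
    cases hfb : PySem.Str.isIn "forward_backward" (pvNameOf f) <;>
      cases hb : PySem.Str.isIn "backward" (pvNameOf f) <;>
        cases hf : PySem.Str.isIn "forward" (pvNameOf f) <;>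
          simp [pvClassify, ih1, ih2, List.any_cons]

-- ===== VERDICT (by name: the statement is the Claim_ definition above) =====
theorem classify_memory_phase_spec : Claim_equal_classify_memory_phase := by
  intro frames _
  unfold Spec_classify_memory_phase classify_memory_phase classify_memory_phase_alt
  rcases frames with _ | ⟨f, rest⟩
  · simp [pvMarks, pvClassify]
  · simp only [if_neg (List.cons_ne_nil f rest)]
    exact (pvLoop_eq _).1
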